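-- pv_equiv track=rewrite | github.com/Sal-Adrian/Keys-of-Life | Sounds.py | createScale
-- ===== SOURCE A (Python) =====
-- def createScale(n, scale, dec):
--     match scale:
--         case "Pentatonic":
--             arr = []
--             curr = int(n / 2)
--             note = curr % 5
--             octave = 12*int(curr/5)
--             curr = octave if dec else -octave
--
--             if(note == 1):
--                 curr += 2 if dec else -3
--             elif(note == 2):
--                 curr += 4 if dec else -5
--             elif(note == 3):
--                 curr += 7 if dec else -8
--             elif(note == 4):
--                 curr += 9 if dec else -10
--
--             for i in range(n):
--                 if(dec):
--                     if(note < 0):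
--                         note = 4
--                     if(note == 0 or note == 3):
--                         curr -= 3
--                     else:
--                         curr -= 2
--                     note -= 1
--                 else:
--                     if(note > 4):
--                         note = 0
--                     if(note == 2 or note == 4):
--                         curr += 3
--                     else:
--                         curr += 2
--                     note += 1
--                 arr.append(curr)
--
--             return arr
-- ===== SOURCE B (Python) =====
-- def createScale(n, scale, dec):
--     if scale != "Pentatonic":
--         return None
--     # trunc-toward-zero halves/fifths (A uses int(n/2), int(curr/5))
--     t = n // 2 if n >= 0 else -((-n) // 2)
--     note = t % 5
--     octave = 12 * (t // 5 if t >= 0 else -((-t) // 5))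
--     if dec:
--         curr0 = octave + [0, 2, 4, 7, 9][note]
--         sign, d, step = -12, [-3, -2, -2, -3, -2], -1
--     else:
--         curr0 = -octave + [0, -3, -5, -8, -10][note]
--         sign, d, step = 12, [2, 2, 3, 2, 3], 1
--     # prefix sums of the period-5 interval cycle starting at phase `note`
--     pre = [0]
--     acc = 0
--     for j in range(5):
--         acc += d[(note + step * j) % 5]
--         pre.append(acc)
--     return [curr0 + sign * ((i + 1) // 5) + pre[(i + 1) % 5]
--             for i in range(max(n, 0))]
-- ===== Notes on version B (the rewrite author's own statement) =====
-- stated objective: alternative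
-- what changed: B replaces A's stateful note/curr accumulator loop by a closed form: each arr[i] is curr0 + sign*((i+1)//5) + pre[(i+1)%5], where pre holds the five partial sums of the fixed period-5 pentatonic interval cycle, so no per-element running state is carried.
import Mathlib
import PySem

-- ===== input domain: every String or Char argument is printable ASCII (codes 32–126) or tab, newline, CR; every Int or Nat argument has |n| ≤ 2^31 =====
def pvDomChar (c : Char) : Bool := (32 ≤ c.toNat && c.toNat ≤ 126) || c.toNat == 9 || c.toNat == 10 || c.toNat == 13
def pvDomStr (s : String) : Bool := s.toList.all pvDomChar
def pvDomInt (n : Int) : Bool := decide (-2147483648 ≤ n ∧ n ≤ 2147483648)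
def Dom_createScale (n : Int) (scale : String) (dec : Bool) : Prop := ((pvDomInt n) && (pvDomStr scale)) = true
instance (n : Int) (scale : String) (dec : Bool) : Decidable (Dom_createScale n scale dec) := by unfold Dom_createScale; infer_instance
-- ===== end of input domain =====

-- B replaces A's note-by-note accumulator loop by a closed form per index: the loop
-- prefix-sums a period-5 interval cycle, so each entry is
-- curr0 + sign*((i+1)//5) + pre[(i+1)%5] with pre the 5 partial sums of the cycle (alternative decomposition, same cost).

-- ===== PORT A =====
-- A-side helpers: the two branches of A's loop body, verbatim
def pvStepDec (st : List Int × Int × Int) : List Int × Int × Int :=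
  let note := if st.2.2 < 0 then 4 else st.2.2
  let curr := if note = 0 ∨ note = 3 then st.2.1 - 3 else st.2.1 - 2
  (st.1 ++ [curr], curr, note - 1)

def pvStepAsc (st : List Int × Int × Int) : List Int × Int × Int :=
  let note := if st.2.2 > 4 then 0 else st.2.2
  let curr := if note = 2 ∨ note = 4 then st.2.1 + 3 else st.2.1 + 2
  (st.1 ++ [curr], curr, note + 1)

def createScale (n : Int) (scale : String) (dec : Bool) : Option (List Int) :=
  if scale = "Pentatonic" then
    -- int(n / 2) and int(curr / 5) truncate toward zero; float division is exact for |n| ≤ 2^31, so Int.tdiv is exact here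
    let curr : Int := n.tdiv 2
    let note : Int := curr % 5          -- Lean % on Int = emod = Python % for positive modulus
    let octave : Int := 12 * curr.tdiv 5
    let curr : Int := if dec then octave else -octave
    let curr : Int :=
      if note = 1 then curr + (if dec then 2 else -3)
      else if note = 2 then curr + (if dec then 4 else -5)
      else if note = 3 then curr + (if dec then 7 else -8)
      else if note = 4 then curr + (if dec then 9 else -10)
      else curr
    let st := (PySem.List.pyRange 0 n 1).foldl
      (fun st _ => if dec then pvStepDec st else pvStepAsc st) ([], curr, note)
    some st.1
  else none

-- ===== PORT B =====
-- B-side helper: _closedForm from Source B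
def pvClosedForm (n curr0 sign : Int) (d : List Int) (note step : Int) : List Int :=
  let pa := (List.range 5).foldl
    (fun (st : List Int × Int) j =>
      let acc := st.2 + PySem.List.pyGetD d ((note + step * (j : Int)) % 5) 0
      (st.1 ++ [acc], acc)) ([0], (0 : Int))
  (List.range (max n 0).toNat).map (fun i =>
    curr0 + sign * (((i + 1) / 5 : Nat) : Int) + PySem.List.pyGetD pa.1 (((i + 1) % 5 : Nat) : Int) 0)

def createScale_alt (n : Int) (scale : String) (dec : Bool) : Option (List Int) :=
  if scale ≠ "Pentatonic" then none
  else
    let t : Int := if n ≥ 0 then PySem.Int.floordiv n 2 else -(PySem.Int.floordiv (-n) 2)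
    let note : Int := t % 5
    let octave : Int := 12 * (if t ≥ 0 then PySem.Int.floordiv t 5 else -(PySem.Int.floordiv (-t) 5))
    -- the list indexings `[…][note]` have note = t % 5 ∈ [0,5), always in range, so the default is never used
    if dec then
      some (pvClosedForm n (octave + PySem.List.pyGetD [0, 2, 4, 7, 9] note 0) (-12) [-3, -2, -2, -3, -2] note (-1))
    else
      some (pvClosedForm n (-octave + PySem.List.pyGetD [0, -3, -5, -8, -10] note 0) 12 [2, 2, 3, 2, 3] note 1)

-- ===== PRECONDITION & SPEC =====
def Spec_createScale (n : Int) (scale : String) (dec : Bool) (out : Option (List Int)) : Prop := out = createScale_alt n scale dec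
instance (n : Int) (scale : String) (dec : Bool) (out : Option (List Int)) : Decidable (Spec_createScale n scale dec out) := by unfold Spec_createScale; infer_instance

-- ===== CLAIM (what is proved, stated in full; the proofs are below) =====
def Claim_equal_createScale : Prop := ∀ (n : Int) (scale : String) (dec : Bool), Dom_createScale n scale dec → Spec_createScale n scale dec (createScale n scale dec)

-- ===== LEMMAS AND PROOFS =====

-- interval deltas of the pentatonic cycle, as functions of the wrapped phase
def pvDA (x : Int) : Int := if x = 2 ∨ x = 4 then 3 else 2
def pvDD (x : Int) : Int := if x = 0 ∨ x = 3 then -3 else -2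

-- closed recurrences for A's running `curr`
def pvFa (c0 p : Int) : Nat → Int
  | 0 => c0
  | m + 1 => pvFa c0 p m + pvDA ((p + m) % 5)

def pvFd (c0 p : Int) : Nat → Int
  | 0 => c0
  | m + 1 => pvFd c0 p m + pvDD ((p - m) % 5)

-- A's `note` variable after k iterations
def pvNoteA (p : Int) (k : Nat) : Int := if k = 0 then p else ((p + k - 1) % 5) + 1
def pvNoteD (p : Int) (k : Nat) : Int := if k = 0 then p else ((p - k + 1) % 5) - 1

theorem pv_foldl_const {α β : Type} (g : β → β) (l : List α) (s : β) :
    l.foldl (fun s _ => g s) s = g^[l.length] s := by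
  induction l generalizing s with
  | nil => rfl
  | cons x xs ih => simp [List.foldl, ih, Function.iterate_succ_apply]

theorem pv_iter_asc (c0 p : Int) (h0 : 0 ≤ p) (h5 : p < 5) (k : Nat) :
    pvStepAsc^[k] ([], c0, p)
      = ((List.range k).map (fun i => pvFa c0 p (i + 1)), pvFa c0 p k, pvNoteA p k) := by
  induction k with
  | zero => simp [pvFa, pvNoteA]
  | succ k ih =>
    rw [Function.iterate_succ_apply', ih]
    have hw : (if pvNoteA p k > 4 then 0 else pvNoteA p k) = (p + k) % 5 := by
      unfold pvNoteA; split_ifs <;> omega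
    have hn : pvNoteA p (k + 1) = (p + k) % 5 + 1 := by
      unfold pvNoteA
      rw [if_neg (Nat.succ_ne_zero k)]
      push_cast; omega
    unfold pvStepAsc
    simp only [hw, hn]
    refine Prod.ext ?_ (Prod.ext ?_ ?_) <;>
      simp [List.range_succ, pvFa, pvDA] <;> (try split_ifs) <;> omega
theorem pv_iter_dec (c0 p : Int) (h0 : 0 ≤ p) (h5 : p < 5) (k : Nat) :
    pvStepDec^[k] ([], c0, p)
      = ((List.range k).map (fun i => pvFd c0 p (i + 1)), pvFd c0 p k, pvNoteD p k) := by
  induction k with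
  | zero => simp [pvFd, pvNoteD]
  | succ k ih =>
    rw [Function.iterate_succ_apply', ih]
    have hw : (if pvNoteD p k < 0 then 4 else pvNoteD p k) = (p - k) % 5 := by
      unfold pvNoteD; split_ifs <;> omega
    have hn : pvNoteD p (k + 1) = (p - k) % 5 - 1 := by
      unfold pvNoteD
      rw [if_neg (Nat.succ_ne_zero k)]
      push_cast; omega
    unfold pvStepDec
    simp only [hw, hn]
    refine Prod.ext ?_ (Prod.ext ?_ ?_) <;>
      simp [List.range_succ, pvFd, pvDD] <;> (try split_ifs) <;> omega

theorem pvFa_shift (c0 p : Int) (m : Nat) : pvFa c0 p m = c0 + pvFa 0 p m := by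
  induction m with
  | zero => simp [pvFa]
  | succ m ih => simp [pvFa, ih]; ring

theorem pvFd_shift (c0 p : Int) (m : Nat) : pvFd c0 p m = c0 + pvFd 0 p m := by
  induction m with
  | zero => simp [pvFd]
  | succ m ih => simp [pvFd, ih]; ring

theorem pv_sum5A (x : Int) :
    pvDA (x % 5) + pvDA ((x + 1) % 5) + pvDA ((x + 2) % 5) + pvDA ((x + 3) % 5) + pvDA ((x + 4) % 5) = 12 := by
  unfold pvDA; split_ifs <;> omega

theorem pv_sum5D (x : Int) :
    pvDD (x % 5) + pvDD ((x - 1) % 5) + pvDD ((x - 2) % 5) + pvDD ((x - 3) % 5) + pvDD ((x - 4) % 5) = -12 := by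
  unfold pvDD; split_ifs <;> omega

theorem pvFa_period (c0 p : Int) (k : Nat) : pvFa c0 p (k + 5) = pvFa c0 p k + 12 := by
  have h := pv_sum5A (p + k)
  show pvFa c0 p (k + 4 + 1) = _
  simp only [pvFa]
  push_cast
  have e1 : (p + (↑k + 1)) % 5 = (p + ↑k + 1) % 5 := by ring_nf
  have e2 : (p + (↑k + 2)) % 5 = (p + ↑k + 2) % 5 := by ring_nf
  have e3 : (p + (↑k + 3)) % 5 = (p + ↑k + 3) % 5 := by ring_nf
  have e4 : (p + (↑k + 4)) % 5 = (p + ↑k + 4) % 5 := by ring_nf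
  rw [e1, e2, e3, e4] at *
  linarith [h]

theorem pvFd_period (c0 p : Int) (k : Nat) : pvFd c0 p (k + 5) = pvFd c0 p k - 12 := by
  have h := pv_sum5D (p - k)
  show pvFd c0 p (k + 4 + 1) = _
  simp only [pvFd]
  push_cast
  have e1 : (p - (↑k + 1)) % 5 = (p - ↑k - 1) % 5 := by ring_nf
  have e2 : (p - (↑k + 2)) % 5 = (p - ↑k - 2) % 5 := by ring_nf
  have e3 : (p - (↑k + 3)) % 5 = (p - ↑k - 3) % 5 := by ring_nf
  have e4 : (p - (↑k + 4)) % 5 = (p - ↑k - 4) % 5 := by ring_nf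
  rw [e1, e2, e3, e4] at *
  linarith [h]

theorem pvFa_closed (c0 p : Int) (m : Nat) :
    pvFa c0 p m = c0 + 12 * ((m / 5 : Nat) : Int) + pvFa 0 p (m % 5) := by
  induction m using Nat.strong_induction_on with
  | _ m ih =>
    by_cases h : m < 5
    · have h1 : m / 5 = 0 := by omega
      have h2 : m % 5 = m := by omega
      rw [h1, h2, ← pvFa_shift]; simp
    · have hm : m = (m - 5) + 5 := by omega
      rw [hm, pvFa_period, ih (m - 5) (by omega)]
      have h1 : ((m - 5) + 5) / 5 = (m - 5) / 5 + 1 := by omega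
      have h2 : ((m - 5) + 5) % 5 = (m - 5) % 5 := by omega
      rw [h1, h2]
      push_cast; ring

theorem pvFd_closed (c0 p : Int) (m : Nat) :
    pvFd c0 p m = c0 + (-12) * ((m / 5 : Nat) : Int) + pvFd 0 p (m % 5) := by
  induction m using Nat.strong_induction_on with
  | _ m ih =>
    by_cases h : m < 5
    · have h1 : m / 5 = 0 := by omega
      have h2 : m % 5 = m := by omega
      rw [h1, h2, ← pvFd_shift]; simp
    · have hm : m = (m - 5) + 5 := by omega
      rw [hm, pvFd_period, ih (m - 5) (by omega)]
      have h1 : ((m - 5) + 5) / 5 = (m - 5) / 5 + 1 := by omega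
      have h2 : ((m - 5) + 5) % 5 = (m - 5) % 5 := by omega
      rw [h1, h2]
      push_cast; ring

-- B's prefix-sum table agrees with the recurrence on one period
theorem pv_pre_asc (p : Int) (h0 : 0 ≤ p) (h5 : p < 5) (r : Nat) (hr : r < 5) :
    PySem.List.pyGetD
      (((List.range 5).foldl
        (fun (st : List Int × Int) j =>
          let acc := st.2 + PySem.List.pyGetD [2, 2, 3, 2, 3] ((p + 1 * (j : Int)) % 5) 0
          (st.1 ++ [acc], acc)) ([0], (0 : Int))).1) (r : Int) 0 = pvFa 0 p r := by
  interval_cases p <;> interval_cases r <;> decide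

theorem pv_pre_dec (p : Int) (h0 : 0 ≤ p) (h5 : p < 5) (r : Nat) (hr : r < 5) :
    PySem.List.pyGetD
      (((List.range 5).foldl
        (fun (st : List Int × Int) j =>
          let acc := st.2 + PySem.List.pyGetD [-3, -2, -2, -3, -2] ((p + (-1) * (j : Int)) % 5) 0
          (st.1 ++ [acc], acc)) ([0], (0 : Int))).1) (r : Int) 0 = pvFd 0 p r := by
  interval_cases p <;> interval_cases r <;> decide

theorem pv_closedForm_asc (n c0 p : Int) (h0 : 0 ≤ p) (h5 : p < 5) :
    pvClosedForm n c0 12 [2, 2, 3, 2, 3] p 1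
      = (List.range n.toNat).map (fun i => pvFa c0 p (i + 1)) := by
  unfold pvClosedForm
  have hmax : (max n 0).toNat = n.toNat := by omega
  rw [hmax]
  refine List.map_congr_left ?_
  intro i _
  simp only []
  rw [pv_pre_asc p h0 h5 ((i + 1) % 5) (Nat.mod_lt _ (by norm_num)),
      pvFa_closed c0 p (i + 1)]

theorem pv_closedForm_dec (n c0 p : Int) (h0 : 0 ≤ p) (h5 : p < 5) :
    pvClosedForm n c0 (-12) [-3, -2, -2, -3, -2] p (-1)
      = (List.range n.toNat).map (fun i => pvFd c0 p (i + 1)) := by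
  unfold pvClosedForm
  have hmax : (max n 0).toNat = n.toNat := by omega
  rw [hmax]
  refine List.map_congr_left ?_
  intro i _
  simp only []
  rw [pv_pre_dec p h0 h5 ((i + 1) % 5) (Nat.mod_lt _ (by norm_num)),
      pvFd_closed c0 p (i + 1)]

-- Source B's sign-cased floor division is A's truncation toward zero
theorem pv_trunc_eq (a k : Int) (hk : 0 < k) :
    (if a ≥ 0 then PySem.Int.floordiv a k else -(PySem.Int.floordiv (-a) k)) = a.tdiv k := by
  rw [PySem.Int.floordiv_eq_ediv_of_pos hk, PySem.Int.floordiv_eq_ediv_of_pos hk]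
  split_ifs with h
  · rw [Int.tdiv_eq_ediv_of_nonneg h]
  · have h1 : (-a).tdiv k = -a / k := Int.tdiv_eq_ediv_of_nonneg (by omega)
    have h2 : (-a).tdiv k = -(a.tdiv k) := Int.neg_tdiv a k
    omega

-- A's if-chain adjustments equal B's table lookups
theorem pv_adj_asc (oct p : Int) (h0 : 0 ≤ p) (h5 : p < 5) :
    (if p = 1 then -oct + -3
     else if p = 2 then -oct + -5
     else if p = 3 then -oct + -8
     else if p = 4 then -oct + -10
     else -oct)
      = -oct + PySem.List.pyGetD [0, -3, -5, -8, -10] p 0 := by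
  interval_cases p <;> simp [PySem.List.pyGetD, PySem.List.pyGet?, PySem.List.pyIdx?]

theorem pv_adj_dec (oct p : Int) (h0 : 0 ≤ p) (h5 : p < 5) :
    (if p = 1 then oct + 2
     else if p = 2 then oct + 4
     else if p = 3 then oct + 7
     else if p = 4 then oct + 9
     else oct)
      = oct + PySem.List.pyGetD [0, 2, 4, 7, 9] p 0 := by
  interval_cases p <;> simp [PySem.List.pyGetD, PySem.List.pyGet?, PySem.List.pyIdx?]

-- ===== VERDICT (by name: the statement is the Claim_ definition above) =====
theorem createScale_spec : Claim_equal_createScale := by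
  intro n scale dec _
  unfold Spec_createScale createScale createScale_alt
  by_cases hs : scale = "Pentatonic"
  · subst hs
    have hp0 : 0 ≤ n.tdiv 2 % 5 := Int.emod_nonneg _ (by norm_num)
    have hp5 : n.tdiv 2 % 5 < 5 := Int.emod_lt_of_pos _ (by norm_num)
    cases dec
    · simp only [reduceIte, Bool.false_eq_true, if_false, ne_eq, not_true_eq_false]
      rw [pv_trunc_eq n 2 (by norm_num), pv_trunc_eq (n.tdiv 2) 5 (by norm_num)]
      rw [pv_foldl_const pvStepAsc, PySem.List.length_pyRange_one,
        pv_iter_asc _ _ hp0 hp5, pv_closedForm_asc n _ _ hp0 hp5,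
        pv_adj_asc (12 * (n.tdiv 2).tdiv 5) _ hp0 hp5]
      simp
    · simp only [reduceIte, ne_eq, not_true_eq_false, if_false]
      rw [pv_trunc_eq n 2 (by norm_num), pv_trunc_eq (n.tdiv 2) 5 (by norm_num)]
      rw [pv_foldl_const pvStepDec, PySem.List.length_pyRange_one,
        pv_iter_dec _ _ hp0 hp5, pv_closedForm_dec n _ _ hp0 hp5,
        pv_adj_dec (12 * (n.tdiv 2).tdiv 5) _ hp0 hp5]
      simp
  · simp [hs]
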